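-- pv_equiv track=rewrite | github.com/MajdZd/KickStartProblems | BookReading.py | pages
-- ===== SOURCE A (Python) =====
-- def pages(p, tornPages):
-- 	r = []
-- 	tornPages.sort()
-- 	c = 0
-- 	for i in range(1, p+1): # for each i from 1 to p (the number of pages)
-- 		if c<len(tornPages): # if all torn pages are checked
-- 			if i != tornPages[c]: # check if i is not a torn page
-- 				r.append(i) # add i to the available pages
-- 			elif i == tornPages[c]: # if i is torn
-- 				c += 1 # go to the next torn page
-- 		else:
-- 			r.append(i) # if all the torn pages were removed add every i until we reach p after that
-- 	return r
-- ===== SOURCE B (Python) =====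
-- def pages(p, tornPages):
--     tornPages.sort()
--     readable = []
--     nextPage = 1
--     for t in tornPages:
--         if t < nextPage or p < t:
--             break
--         readable.extend(range(nextPage, t))
--         nextPage = t + 1
--     readable.extend(range(nextPage, p + 1))
--     return readable
-- ===== Notes on version B (the rewrite author's own statement) =====
-- stated objective: alternative
-- what changed: Replaces A's per-page loop over range(1, p+1) with a pointer advanced through the sorted torn list by a loop over the sorted torn list itself that extends the result with the whole block of readable pages before each torn entry, stopping at the first entry behind the cursor or beyond p, then extends with the final block.
import Mathlib
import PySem

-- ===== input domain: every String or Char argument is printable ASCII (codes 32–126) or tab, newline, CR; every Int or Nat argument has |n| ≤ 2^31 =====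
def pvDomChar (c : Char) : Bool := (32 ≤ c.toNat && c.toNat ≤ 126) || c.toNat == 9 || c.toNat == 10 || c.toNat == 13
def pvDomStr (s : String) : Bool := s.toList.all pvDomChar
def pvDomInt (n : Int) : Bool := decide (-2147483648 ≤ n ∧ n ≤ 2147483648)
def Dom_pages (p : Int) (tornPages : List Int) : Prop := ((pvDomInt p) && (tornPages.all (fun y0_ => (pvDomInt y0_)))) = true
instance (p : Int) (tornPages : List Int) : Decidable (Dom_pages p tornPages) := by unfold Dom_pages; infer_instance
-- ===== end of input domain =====

-- B emits whole blocks of readable pages between consecutive entries of the sorted torn list,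
-- instead of A's per-page pointer walk; both sort tornPages in place, and the equivalence proved
-- is about the return value.

-- ===== PORT A =====
-- the body of A's for-loop over range(1, p+1); state = (r, c)
-- tornPages[c] is only read under the guard c < len(tornPages) with c ≥ 0, so the index never raises;
-- pyGetD's default is unreachable there.
def pagesStep (t : List Int) (st : List Int × Int) (i : Int) : List Int × Int :=
  if st.2 < (t.length : Int) then
    if i ≠ PySem.List.pyGetD t st.2 0 then (st.1 ++ [i], st.2)
    else if i = PySem.List.pyGetD t st.2 0 then (st.1, st.2 + 1)
    else st
  else (st.1 ++ [i], st.2)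

def pages (p : Int) (tornPages : List Int) : List Int :=
  ((PySem.List.pyRange 1 (p + 1) 1).foldl
    (pagesStep (PySem.List.sorted tornPages (fun x => x) false)) ([], 0)).1

-- ===== PORT B =====
-- B's for-loop over the sorted torn list; state = (readable, nextPage); returning the state early
-- transcribes the break.
def pagesAltLoop (p : Int) (acc : List Int) (nextPage : Int) : List Int → List Int × Int
  | [] => (acc, nextPage)
  | t :: rest =>
    if t < nextPage || p < t then (acc, nextPage)
    else pagesAltLoop p (acc ++ PySem.List.pyRange nextPage t 1) (t + 1) rest

def pages_alt (p : Int) (tornPages : List Int) : List Int :=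
  let s := PySem.List.sorted tornPages (fun x => x) false
  let st := pagesAltLoop p [] 1 s
  st.1 ++ PySem.List.pyRange st.2 (p + 1) 1

-- ===== PRECONDITION & SPEC =====
def Spec_pages (p : Int) (tornPages : List Int) (out : List Int) : Prop := out = pages_alt p tornPages
instance (p : Int) (tornPages : List Int) (out : List Int) : Decidable (Spec_pages p tornPages out) := by
  unfold Spec_pages; infer_instance

-- ===== CLAIM =====
def Claim_equal_pages : Prop := ∀ (p : Int) (tornPages : List Int), Dom_pages p tornPages → Spec_pages p tornPages (pages p tornPages)

-- ===== LEMMAS AND PROOFS =====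

-- The set of pages A's pointer walk skips: the strictly increasing front run of the sorted torn
-- list, starting above prev and capped at p. A proof-only characterisation of A's walk.
def pvRun (p prev : Int) : List Int → List Int
  | [] => []
  | v :: rest => if v ≤ prev || p < v then [] else v :: pvRun p v rest

-- A's fold with its integer counter into t, restated with the yet-unconsumed suffix of t as the state.
def pvStepD (st : List Int × List Int) (i : Int) : List Int × List Int :=
  match st.2 with
  | [] => (st.1 ++ [i], [])
  | v :: vs => if i = v then (st.1, vs) else (st.1 ++ [i], v :: vs)

theorem pvFoldA_eq_foldD (t : List Int) (L : List Int) :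
    ∀ (c : Nat) (r : List Int), c ≤ t.length →
      (L.foldl (pagesStep t) (r, (c : Int))).1 = (L.foldl pvStepD (r, t.drop c)).1 := by
  induction L with
  | nil => intro c r _; rfl
  | cons i L ih =>
    intro c r hc
    by_cases h : c < t.length
    · have hdrop : t.drop c = t[c] :: t.drop (c + 1) := List.drop_eq_getElem_cons h
      have hget : PySem.List.pyGetD t (c : Int) 0 = t[c] := by
        simpa using PySem.List.pyGetD_eq_getElem (xs := t) (i := (c : Int)) (d := 0)
          (by positivity) (by exact_mod_cast h)
      by_cases hi : i = t[c]
      · have : pagesStep t (r, (c : Int)) i = (r, (c : Int) + 1) := by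
          simp [pagesStep, hget, hi, h]
        rw [List.foldl_cons, List.foldl_cons, this, hdrop]
        have : pvStepD (r, t[c] :: t.drop (c + 1)) i = (r, t.drop (c + 1)) := by
          simp [pvStepD, hi]
        rw [this]
        have hcast : ((c : Int) + 1) = ((c + 1 : Nat) : Int) := by push_cast; ring
        rw [hcast]
        exact ih (c + 1) r h
      · have h1 : pagesStep t (r, (c : Int)) i = (r ++ [i], (c : Int)) := by
          simp [pagesStep, hget, hi, h]
        have h2 : pvStepD (r, t.drop c) i = (r ++ [i], t.drop c) := by
          rw [hdrop]; simp [pvStepD, hi]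
        rw [List.foldl_cons, List.foldl_cons, h1, h2]
        exact ih c (r ++ [i]) hc
    · have hce : c = t.length := le_antisymm hc (not_lt.mp h)
      have hdrop : t.drop c = [] := by simp [hce]
      have hnot : ¬ ((c : Int) < (t.length : Int)) := by exact_mod_cast h
      have h1 : pagesStep t (r, (c : Int)) i = (r ++ [i], (c : Int)) := by
        simp [pagesStep, hnot]
      have h2 : pvStepD (r, t.drop c) i = (r ++ [i], t.drop c) := by
        rw [hdrop]; simp [pvStepD]
      rw [List.foldl_cons, List.foldl_cons, h1, h2]
      exact ih c (r ++ [i]) hc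

theorem pvRun_spec (P : Int) : ∀ (l : List Int) (prev x : Int),
    x ∈ pvRun P prev l → x ∈ l ∧ prev < x ∧ x ≤ P := by
  intro l
  induction l with
  | nil => intro prev x hx; simp [pvRun] at hx
  | cons v vs ih =>
    intro prev x hx
    by_cases h : v ≤ prev || P < v
    · simp [pvRun, h] at hx
    · rw [pvRun, if_neg h] at hx
      simp only [Bool.or_eq_true, decide_eq_true_eq, not_or] at h
      rcases List.mem_cons.mp hx with h1 | h2
      · subst h1; exact ⟨List.mem_cons_self, by omega, by omega⟩
      · obtain ⟨hm, hlt, hle⟩ := ih v x h2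
        exact ⟨List.mem_cons_of_mem _ hm, by omega, hle⟩

theorem pvFoldD_eq_filter (n : Nat) : ∀ (a : Int) (rem r : List Int),
    ((PySem.List.pyRange a (a + n) 1).foldl pvStepD (r, rem)).1
      = r ++ (PySem.List.pyRange a (a + n) 1).filter
          (fun i => !((pvRun (a + n - 1) (a - 1) rem).contains i)) := by
  induction n with
  | zero =>
    intro a rem r
    rw [PySem.List.pyRange_one_eq_nil (by omega)]
    simp
  | succ n ih =>
    intro a rem r
    have hsplit : PySem.List.pyRange a (a + ((n : Nat) + 1 : Nat)) 1
        = a :: PySem.List.pyRange (a + 1) (a + ((n : Nat) + 1 : Nat)) 1 :=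
      PySem.List.pyRange_one_cons (by push_cast; omega)
    have hend : (a : Int) + ((n : Nat) + 1 : Nat) = (a + 1) + (n : Nat) := by push_cast; ring
    cases rem with
    | nil =>
      have IH := ih (a + 1) [] (r ++ [a])
      rw [← hend] at IH
      rw [hsplit, List.foldl_cons]
      have hstep : pvStepD (r, ([] : List Int)) a = (r ++ [a], []) := by simp [pvStepD]
      rw [hstep, IH]
      simp [pvRun]
    | cons v vs =>
      by_cases hdead : v ≤ a - 1 ∨ (a + ((n : Nat) + 1 : Nat) - 1) < v
      · -- the run is already broken: the chain is empty now and stays empty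
        have hva : a ≠ v := by push_cast at hdead ⊢; omega
        have hstep : pvStepD (r, v :: vs) a = (r ++ [a], v :: vs) := by
          simp [pvStepD, hva]
        have e1 : pvRun (a + ((n : Nat) + 1 : Nat) - 1) (a - 1) (v :: vs) = [] := by
          rw [pvRun, if_pos]
          simp only [Bool.or_eq_true, decide_eq_true_eq]
          push_cast at hdead ⊢; omega
        have e2 : pvRun (a + ((n : Nat) + 1 : Nat) - 1) a (v :: vs) = [] := by
          rw [pvRun, if_pos]
          simp only [Bool.or_eq_true, decide_eq_true_eq]
          push_cast at hdead ⊢; omega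
        have IH := ih (a + 1) (v :: vs) (r ++ [a])
        rw [← hend] at IH
        simp only [add_sub_cancel_right] at IH
        rw [hsplit, List.foldl_cons, hstep, IH, e1, e2]
        simp
      · -- run alive: a - 1 < v ∧ v ≤ a + n
        push_cast at hdead
        have hv1 : a - 1 < v := by omega
        have echain : pvRun (a + ((n : Nat) + 1 : Nat) - 1) (a - 1) (v :: vs)
            = v :: pvRun (a + ((n : Nat) + 1 : Nat) - 1) v vs := by
          rw [pvRun, if_neg]
          simp only [Bool.or_eq_true, decide_eq_true_eq]
          push_cast; omega
        by_cases hva : a = v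
        · -- page a is the head of the run: A consumes the pointer, B filters it out
          subst hva
          have hstep : pvStepD (r, a :: vs) a = (r, vs) := by simp [pvStepD]
          have IH := ih (a + 1) vs r
          rw [← hend] at IH
          simp only [add_sub_cancel_right] at IH
          rw [hsplit, List.foldl_cons, hstep, IH, echain]
          have hfc : (PySem.List.pyRange (a + 1) (a + ((n : Nat) + 1 : Nat)) 1).filter
                (fun i => !((a :: pvRun (a + ((n : Nat) + 1 : Nat) - 1) a vs).contains i))
              = (PySem.List.pyRange (a + 1) (a + ((n : Nat) + 1 : Nat)) 1).filter
                (fun i => !((pvRun (a + ((n : Nat) + 1 : Nat) - 1) a vs).contains i)) := by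
            apply List.filter_congr
            intro i hi
            have hia : a + 1 ≤ i := (PySem.List.mem_pyRange_one.mp hi).1
            have hiv : i ≠ a := by omega
            simp [hiv]
          simp only [List.filter_cons]
          rw [hfc]
          simp
        · -- page a is below the run head: both keep the page, the run is unchanged
          have hvgta : a < v := by omega
          have hstep : pvStepD (r, v :: vs) a = (r ++ [a], v :: vs) := by
            simp [pvStepD, hva]
          have echain' : pvRun (a + ((n : Nat) + 1 : Nat) - 1) a (v :: vs)
              = v :: pvRun (a + ((n : Nat) + 1 : Nat) - 1) v vs := by
            rw [pvRun, if_neg]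
            simp only [Bool.or_eq_true, decide_eq_true_eq]
            push_cast; omega
          have hnotmem : a ∉ v :: pvRun (a + ((n : Nat) + 1 : Nat) - 1) v vs := by
            intro hmem
            rcases List.mem_cons.mp hmem with h | h
            · exact hva h
            · have := (pvRun_spec _ _ _ _ h).2.1; omega
          have IH := ih (a + 1) (v :: vs) (r ++ [a])
          rw [← hend] at IH
          simp only [add_sub_cancel_right] at IH
          rw [echain'] at IH
          rw [hsplit, List.foldl_cons, hstep, IH, echain]
          simp only [List.filter_cons]
          simp [List.contains_eq_mem]
          refine ⟨hva, fun h => ?_⟩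
          push_cast at hnotmem
          exact hnotmem (List.mem_cons_of_mem _ h)

-- A's output is the range filtered by non-membership in the run (for 0 ≤ p).
theorem pages_eq_filter (p : Int) (tornPages : List Int) (hp : 0 ≤ p) :
    pages p tornPages
      = (PySem.List.pyRange 1 (p + 1) 1).filter
          (fun i => !((pvRun p 0 (PySem.List.sorted tornPages (fun x => x) false)).contains i)) := by
  unfold pages
  set t := PySem.List.sorted tornPages (fun x => x) false with ht
  rw [show ((0 : Int)) = ((0 : Nat) : Int) from rfl]
  rw [pvFoldA_eq_foldD t _ 0 [] (Nat.zero_le _)]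
  have hpn : (1 : Int) + (p.toNat : Nat) = p + 1 := by omega
  have := pvFoldD_eq_filter p.toNat 1 (t.drop 0) []
  rw [hpn] at this
  rw [this]
  simp only [List.drop_zero, List.nil_append]
  norm_num

-- B's loop-plus-final-extend equals the range filtered by non-membership in the run.
theorem pvLoop_eq_filter (p : Int) : ∀ (l : List Int) (np : Int) (acc : List Int),
    (pagesAltLoop p acc np l).1
        ++ PySem.List.pyRange (pagesAltLoop p acc np l).2 (p + 1) 1
      = acc ++ (PySem.List.pyRange np (p + 1) 1).filter
          (fun i => !((pvRun p (np - 1) l).contains i)) := by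
  intro l
  induction l with
  | nil =>
    intro np acc
    simp [pagesAltLoop, pvRun]
  | cons t rest ih =>
    intro np acc
    by_cases hbr : t < np || p < t
    · have hrun : pvRun p (np - 1) (t :: rest) = [] := by
        rw [pvRun, if_pos]
        simp only [Bool.or_eq_true, decide_eq_true_eq] at hbr ⊢
        omega
      rw [pagesAltLoop, if_pos hbr, hrun]
      simp
    · simp only [Bool.or_eq_true, decide_eq_true_eq, not_or, not_lt] at hbr
      obtain ⟨hnp, htp⟩ := hbr
      have hrun : pvRun p (np - 1) (t :: rest) = t :: pvRun p t rest := by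
        rw [pvRun, if_neg]
        simp only [Bool.or_eq_true, decide_eq_true_eq]
        omega
      rw [pagesAltLoop, if_neg (by simp; omega), hrun]
      rw [ih (t + 1) (acc ++ PySem.List.pyRange np t 1)]
      -- split the page range at t and t+1
      rw [PySem.List.pyRange_one_append np t (p + 1) hnp (by omega),
        PySem.List.pyRange_one_append t (t + 1) (p + 1) (by omega) (by omega),
        PySem.List.pyRange_one_singleton]
      rw [List.filter_append, List.filter_append]
      have hleft : (PySem.List.pyRange np t 1).filter
          (fun i => !((t :: pvRun p t rest).contains i)) = PySem.List.pyRange np t 1 := by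
        apply List.filter_eq_self.mpr
        intro i hi
        have hit : i < t := (PySem.List.mem_pyRange_one.mp hi).2
        simp only [List.contains_eq_mem, List.mem_cons, Bool.not_eq_eq_eq_not, Bool.not_true,
          decide_eq_false_iff_not, not_or]
        constructor
        · omega
        · intro hm
          have := (pvRun_spec p rest t i hm).2.1; omega
      have hmid : ([t] : List Int).filter
          (fun i => !((t :: pvRun p t rest).contains i)) = [] := by
        simp
      have hright : (PySem.List.pyRange (t + 1) (p + 1) 1).filter
            (fun i => !((t :: pvRun p t rest).contains i))
          = (PySem.List.pyRange (t + 1) (p + 1) 1).filter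
            (fun i => !((pvRun p t rest).contains i)) := by
        apply List.filter_congr
        intro i hi
        have hit : t + 1 ≤ i := (PySem.List.mem_pyRange_one.mp hi).1
        have : i ≠ t := by omega
        simp [this]
      rw [hleft, hmid, hright]
      simp

-- ===== VERDICT =====
theorem pages_spec : Claim_equal_pages := by
  intro p tornPages _
  unfold Spec_pages
  have hB : pages_alt p tornPages
      = (PySem.List.pyRange 1 (p + 1) 1).filter
          (fun i => !((pvRun p 0 (PySem.List.sorted tornPages (fun x => x) false)).contains i)) := by
    unfold pages_alt
    have := pvLoop_eq_filter p (PySem.List.sorted tornPages (fun x => x) false) 1 []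
    norm_num at this ⊢
    exact this
  by_cases hp : 0 ≤ p
  · rw [hB]
    exact pages_eq_filter p tornPages hp
  · have hempty : PySem.List.pyRange 1 (p + 1) 1 = [] :=
      PySem.List.pyRange_one_eq_nil (by omega)
    rw [hB, hempty]
    unfold pages
    rw [hempty]
    rfl
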